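-- pv_equiv track=rewrite | github.com/cheickmec/spreadsheet-analyzer | src/spreadsheet_analyzer/notebook_cli.py | _sanitize_model_name
-- ===== SOURCE A (Python) =====
-- def _sanitize_model_name(model: str) -> str:
--     """Sanitize model name for use in file names."""
--     # Remove version suffixes and special characters
--     model_clean = model.replace("-", "_").replace(".", "_")
--     # Extract the main model name (e.g., "claude_3_5_sonnet" from "claude-3-5-sonnet-20241022")
--     if "claude" in model_clean.lower():
--         # Extract Claude model variant
--         if "opus" in model_clean.lower():
--             return "claude_opus"
--         elif "sonnet" in model_clean.lower():
--             return "claude_sonnet"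
--         elif "haiku" in model_clean.lower():
--             return "claude_haiku"
--         else:
--             return "claude"
--     elif "gpt" in model_clean.lower():
--         # Extract GPT model variant
--         if "4" in model_clean:
--             return "gpt4"
--         elif "3" in model_clean:
--             return "gpt3"
--         else:
--             return "gpt"
--     elif any(name in model_clean.lower() for name in ["ollama", "mistral", "llama", "mixtral", "codellama"]):
--         # Extract Ollama/local model variant
--         if "mistral" in model_clean.lower():
--             return "ollama_mistral"
--         elif "llama" in model_clean.lower():
--             return "ollama_llama"
--         elif "mixtral" in model_clean.lower():
--             return "ollama_mixtral"
--         elif "codellama" in model_clean.lower():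
--             return "ollama_codellama"
--         else:
--             return "ollama"
--     else:
--         # For other models, use a simplified version
--         return model_clean.split("_")[0] if "_" in model_clean else model_clean
-- ===== SOURCE B (Python) =====
-- # Staged re-implementation: compute once the SET of keywords present, then match a flat
-- # first-hit decision list of keyword-set requirements (no nested guards, no group tests).
-- _KEYWORDS = ["claude", "opus", "sonnet", "haiku", "gpt",
--              "mistral", "llama", "mixtral", "codellama", "ollama"]
--
-- # Flat ordered rules: first rule whose required keywords are all present wins.
-- _RULES = [
--     ({"claude", "opus"}, "claude_opus"),
--     ({"claude", "sonnet"}, "claude_sonnet"),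
--     ({"claude", "haiku"}, "claude_haiku"),
--     ({"claude"}, "claude"),
--     ({"gpt", "4"}, "gpt4"),
--     ({"gpt", "3"}, "gpt3"),
--     ({"gpt"}, "gpt"),
--     ({"mistral"}, "ollama_mistral"),
--     ({"llama"}, "ollama_llama"),
--     ({"mixtral"}, "ollama_mixtral"),
--     ({"codellama"}, "ollama_codellama"),
--     ({"ollama"}, "ollama"),
-- ]
--
--
-- def _sanitize_model_name(model: str) -> str:
--     clean = model.replace("-", "_").replace(".", "_")
--     low = clean.lower()
--     found = {kw for kw in _KEYWORDS if kw in low}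
--     found |= {d for d in ("4", "3") if d in clean}
--     for req, out in _RULES:
--         if req <= found:
--             return out
--     return clean.split("_")[0] if "_" in clean else clean
-- ===== Notes on version B (the rewrite author's own statement) =====
-- stated objective: alternative
-- what changed: Instead of A's nested if/elif cascade with group guards, B first computes the set of keywords occurring in the cleaned name in one staged pass, then returns the first hit in a flat decision list of keyword-set requirements (the ollama group guard and its nesting disappear entirely).
import Mathlib
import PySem

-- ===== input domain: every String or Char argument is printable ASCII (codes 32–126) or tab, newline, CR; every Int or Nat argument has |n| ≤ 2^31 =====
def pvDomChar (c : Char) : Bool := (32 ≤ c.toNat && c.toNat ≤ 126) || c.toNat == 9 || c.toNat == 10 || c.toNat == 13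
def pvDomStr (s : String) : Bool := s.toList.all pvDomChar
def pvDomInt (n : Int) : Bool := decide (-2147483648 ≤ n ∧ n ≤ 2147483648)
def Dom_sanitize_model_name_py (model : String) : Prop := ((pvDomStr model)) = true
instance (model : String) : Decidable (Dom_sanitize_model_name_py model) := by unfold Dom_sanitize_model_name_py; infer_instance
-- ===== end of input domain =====

-- B stages the work differently: it first computes the set of keywords present, then matches a
-- flat first-hit list of keyword-set requirements (no nested guards); same cost, plainer structure.

-- ===== PORT A =====
-- literal transliteration of A's nested if/elif tree (lower() recomputed at each test, as in A)
def sanitize_model_name_py (model : String) : String :=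
  let model_clean := PySem.Str.replace (PySem.Str.replace model "-" "_") "." "_"
  if PySem.Str.isIn "claude" (PySem.Str.lower model_clean) then
    if PySem.Str.isIn "opus" (PySem.Str.lower model_clean) then "claude_opus"
    else if PySem.Str.isIn "sonnet" (PySem.Str.lower model_clean) then "claude_sonnet"
    else if PySem.Str.isIn "haiku" (PySem.Str.lower model_clean) then "claude_haiku"
    else "claude"
  else if PySem.Str.isIn "gpt" (PySem.Str.lower model_clean) then
    if PySem.Str.isIn "4" model_clean then "gpt4"
    else if PySem.Str.isIn "3" model_clean then "gpt3"
    else "gpt"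
  else if (["ollama", "mistral", "llama", "mixtral", "codellama"] : List String).any
      (fun name => PySem.Str.isIn name (PySem.Str.lower model_clean)) then
    if PySem.Str.isIn "mistral" (PySem.Str.lower model_clean) then "ollama_mistral"
    else if PySem.Str.isIn "llama" (PySem.Str.lower model_clean) then "ollama_llama"
    else if PySem.Str.isIn "mixtral" (PySem.Str.lower model_clean) then "ollama_mixtral"
    else if PySem.Str.isIn "codellama" (PySem.Str.lower model_clean) then "ollama_codellama"
    else "ollama"
  else if PySem.Str.isIn "_" model_clean then (((PySem.Str.split? model_clean "_").getD []).headD "")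
  else model_clean

-- ===== PORT B =====
def pvKeywords : List String :=
  ["claude", "opus", "sonnet", "haiku", "gpt", "mistral", "llama", "mixtral", "codellama", "ollama"]

-- flat ordered rules: (required keyword set, result); Python set literals ported as their element lists
def pvRules : List (List String × String) :=
  [ (["claude", "opus"], "claude_opus"),
    (["claude", "sonnet"], "claude_sonnet"),
    (["claude", "haiku"], "claude_haiku"),
    (["claude"], "claude"),
    (["gpt", "4"], "gpt4"),
    (["gpt", "3"], "gpt3"),
    (["gpt"], "gpt"),
    (["mistral"], "ollama_mistral"),
    (["llama"], "ollama_llama"),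
    (["mixtral"], "ollama_mixtral"),
    (["codellama"], "ollama_codellama"),
    (["ollama"], "ollama") ]

-- the for-loop over _RULES: first rule whose requirement set is a subset of `found`, else the fallback
def pvMatchRules (found : PySem.Set String) (clean : String) : List (List String × String) → String
  | [] =>
      if PySem.Str.isIn "_" clean then (((PySem.Str.split? clean "_").getD []).headD "")
      else clean
  | (req, out) :: rest =>
      if PySem.Set.issubset (PySem.Set.ofList req) found then out
      else pvMatchRules found clean rest

def sanitize_model_name_py_alt (model : String) : String :=
  let clean := PySem.Str.replace (PySem.Str.replace model "-" "_") "." "_"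
  let low := PySem.Str.lower clean
  let found : PySem.Set String := PySem.Set.ofList (pvKeywords.filter (fun kw => PySem.Str.isIn kw low))
  let found := PySem.Set.union found
      (PySem.Set.ofList ((["4", "3"] : List String).filter (fun d => PySem.Str.isIn d clean)))
  pvMatchRules found clean pvRules

-- ===== PRECONDITION & SPEC =====
def Spec_sanitize_model_name_py (model : String) (out : String) : Prop := out = sanitize_model_name_py_alt model
instance (model : String) (out : String) : Decidable (Spec_sanitize_model_name_py model out) := by unfold Spec_sanitize_model_name_py; infer_instance

-- ===== CLAIM (what is proved, stated in full; the proofs are below) =====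
def Claim_equal_sanitize_model_name_py : Prop := ∀ (model : String), Dom_sanitize_model_name_py model → Spec_sanitize_model_name_py model (sanitize_model_name_py model)

-- ===== LEMMAS AND PROOFS =====

-- membership in B's `found` set, characterised by the per-keyword substring tests
theorem pv_mem_found (kw low clean : String) :
    kw ∈ PySem.Set.union (PySem.Set.ofList (pvKeywords.filter (fun k => PySem.Str.isIn k low)))
        (PySem.Set.ofList ((["4", "3"] : List String).filter (fun d => PySem.Str.isIn d clean))) ↔
      (kw ∈ pvKeywords ∧ PySem.Str.isIn kw low = true) ∨
      (kw ∈ (["4", "3"] : List String) ∧ PySem.Str.isIn kw clean = true) := by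
  simp [PySem.Set.mem_union, PySem.Set.mem_ofList, List.mem_filter]

-- a rule's subset test over `found`, as a Boolean formula in the substring atoms
theorem pv_subset_found (req : List String) (low clean : String) :
    PySem.Set.issubset (PySem.Set.ofList req)
      (PySem.Set.union (PySem.Set.ofList (pvKeywords.filter (fun k => PySem.Str.isIn k low)))
        (PySem.Set.ofList ((["4", "3"] : List String).filter (fun d => PySem.Str.isIn d clean)))) =
      req.all (fun kw => (pvKeywords.contains kw && PySem.Str.isIn kw low) ||
        ((["4", "3"] : List String).contains kw && PySem.Str.isIn kw clean)) := by
  rw [Bool.eq_iff_iff, PySem.Set.issubset_iff, List.all_eq_true]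
  simp only [PySem.Set.mem_ofList, pv_mem_found, List.contains_eq_mem, Bool.or_eq_true,
    Bool.and_eq_true, decide_eq_true_eq]


-- ===== VERDICT (by name: the statement is the Claim_ definition above) =====
theorem sanitize_model_name_py_spec : Claim_equal_sanitize_model_name_py := by
  intro model _
  unfold Spec_sanitize_model_name_py sanitize_model_name_py sanitize_model_name_py_alt
  simp only [pvRules, pvMatchRules, pv_subset_found]
  set clean := PySem.Str.replace (PySem.Str.replace model "-" "_") "." "_" with hclean
  set low := PySem.Str.lower clean with hlow
  simp only [pvKeywords, List.any, List.all, List.contains, List.elem, String.reduceBEq,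
    Bool.true_and, Bool.false_and, Bool.or_false, Bool.false_or, Bool.and_true]
  generalize PySem.Str.isIn "claude" low = c
  generalize PySem.Str.isIn "opus" low = o
  generalize PySem.Str.isIn "sonnet" low = so
  generalize PySem.Str.isIn "haiku" low = ha
  generalize PySem.Str.isIn "gpt" low = g
  generalize PySem.Str.isIn "4" clean = d4
  generalize PySem.Str.isIn "3" clean = d3
  generalize PySem.Str.isIn "mistral" low = mi
  generalize PySem.Str.isIn "llama" low = ll
  generalize PySem.Str.isIn "mixtral" low = mx
  generalize PySem.Str.isIn "codellama" low = cd
  generalize PySem.Str.isIn "ollama" low = ol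
  generalize PySem.Str.isIn "_" clean = us
  rcases c <;> rcases g <;> rcases mi <;> rcases ll <;> rcases mx <;> rcases cd <;> rcases ol <;>
    simp
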